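-- pv_equiv track=rewrite | github.com/IreneKhymych/Algorithms | dz11/11.8/main.py | count
-- ===== SOURCE A (Python) =====
-- def count(arr, t):
--     def merge(arr, temp_arr, left, mid, right, t):
--         i, j, k = left, mid + 1, left
--         inv_count = 0
--
--         while i <= mid and j <= right:
--             if arr[i] > arr[j] + t:
--                 inv_count += (mid - i + 1)
--                 j += 1
--             else:
--                 i += 1
--         i, j, k = left, mid + 1, left
--
--         while i <= mid and j <= right:
--             if arr[i] <= arr[j]:
--                 temp_arr[k] = arr[i]
--                 i += 1
--             else:
--                 temp_arr[k] = arr[j]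
--                 j += 1
--             k += 1
--
--         while i <= mid:
--             temp_arr[k] = arr[i]
--             i += 1
--             k += 1
--
--         while j <= right:
--             temp_arr[k] = arr[j]
--             j += 1
--             k += 1
--
--         for i in range(left, right + 1):
--             arr[i] = temp_arr[i]
--
--         return inv_count
--
--     def merge_and_count(arr, temp_arr, left, right, t):
--         if left >= right:
--             return 0
--         mid = (left + right) // 2
--         inv_count = merge_and_count(arr, temp_arr, left, mid, t)
--         inv_count += merge_and_count(arr, temp_arr, mid + 1, right, t)
--         inv_count += merge(arr, temp_arr, left, mid, right, t)
--         return inv_count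
--
--     n = len(arr)
--     temp_arr = [0] * n
--     return merge_and_count(arr, temp_arr, 0, n - 1, t)
-- ===== SOURCE B (Python) =====
-- def count(arr, t):
--     total = 0
--     rest = list(arr)
--     while rest:
--         x = rest.pop(0)
--         for y in rest:
--             if x > y + t:
--                 total += 1
--     return total
-- ===== Notes on version B (the rewrite author's own statement) =====
-- stated objective: simpler
-- what changed: Replaces the recursive merge-sort inversion counter (which also sorts arr in place) with a direct two-loop scan counting pairs i<j with arr[i] > arr[j]+t; B leaves arr unmodified.
import Mathlib
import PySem

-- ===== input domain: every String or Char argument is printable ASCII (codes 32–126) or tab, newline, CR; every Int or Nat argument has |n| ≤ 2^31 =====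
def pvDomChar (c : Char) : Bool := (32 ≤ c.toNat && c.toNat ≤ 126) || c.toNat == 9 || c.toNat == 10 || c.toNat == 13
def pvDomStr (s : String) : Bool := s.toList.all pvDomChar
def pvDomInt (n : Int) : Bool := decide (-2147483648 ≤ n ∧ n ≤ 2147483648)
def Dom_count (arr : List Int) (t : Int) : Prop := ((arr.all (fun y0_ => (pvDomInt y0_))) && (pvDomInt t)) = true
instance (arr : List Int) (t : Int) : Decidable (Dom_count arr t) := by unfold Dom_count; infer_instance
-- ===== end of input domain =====

-- B replaces A's recursive merge-sort inversion counter by a direct two-loop pair scan (simpler, not faster);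
-- equivalence is about the RETURN value only: A sorts arr in place, B leaves arr unmodified.

-- ===== PORT A =====
-- arr[i] for the in-range indices the algorithm uses
def getE (a : List Int) (i : Nat) : Int := a.getD i 0

-- first while loop of merge: counting
def cntLoop (a : List Int) (mid right : Nat) (t : Int) (i j : Nat) : Int :=
  if h : i ≤ mid ∧ j ≤ right then
    if getE a i > getE a j + t then ((mid + 1 - i : Nat) : Int) + cntLoop a mid right t i (j + 1)
    else cntLoop a mid right t (i + 1) j
  else 0
termination_by (mid + 1 - i) + (right + 1 - j)
decreasing_by all_goals omega

-- second while loop of merge: stable merge into temp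
def mergeLoop (a temp : List Int) (mid right : Nat) (i j k : Nat) : List Int × Nat × Nat × Nat :=
  if h : i ≤ mid ∧ j ≤ right then
    if getE a i ≤ getE a j then mergeLoop a (temp.set k (getE a i)) mid right (i + 1) j (k + 1)
    else mergeLoop a (temp.set k (getE a j)) mid right i (j + 1) (k + 1)
  else (temp, i, j, k)
termination_by (mid + 1 - i) + (right + 1 - j)
decreasing_by all_goals omega

-- the two copy-rest while loops of merge
def copyLoop (a temp : List Int) (bound i k : Nat) : List Int × Nat :=
  if i ≤ bound then copyLoop a (temp.set k (getE a i)) bound (i + 1) (k + 1) else (temp, k)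
termination_by bound + 1 - i

-- final for loop of merge: write temp back into arr
def writeBack (a temp : List Int) (i r : Nat) : List Int :=
  if i ≤ r then writeBack (a.set i (getE temp i)) temp (i + 1) r else a
termination_by r + 1 - i

-- merge(arr, temp_arr, left, mid, right, t): returns (arr, temp_arr, inv_count)
def mergeStep (a temp : List Int) (left mid right : Nat) (t : Int) : List Int × List Int × Int :=
  let inv := cntLoop a mid right t left (mid + 1)
  let m := mergeLoop a temp mid right left (mid + 1) left
  let c1 := copyLoop a m.1 mid m.2.1 m.2.2.2
  let c2 := copyLoop a c1.1 right m.2.2.1 c1.2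
  (writeBack a c2.1 left right, c2.1, inv)

-- merge_and_count(arr, temp_arr, left, right, t): returns (arr, temp_arr, inv_count)
def mergeAndCount (a temp : List Int) (l r : Nat) (t : Int) : List Int × List Int × Int :=
  if h : l < r then
    let mid := (l + r) / 2
    let s1 := mergeAndCount a temp l mid t
    let s2 := mergeAndCount s1.1 s1.2.1 (mid + 1) r t
    let s3 := mergeStep s2.1 s2.2.1 l mid r t
    (s3.1, s3.2.1, s1.2.2 + s2.2.2 + s3.2.2)
  else (a, temp, 0)
termination_by r - l
decreasing_by all_goals omega

def count (arr : List Int) (t : Int) : Int :=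
  (mergeAndCount arr (List.replicate arr.length 0) 0 (arr.length - 1) t).2.2

-- ===== PORT B =====
-- inner for loop: count y in rest with x > y + t, added onto total
def innerCnt (t x : Int) (ys : List Int) (total : Int) : Int :=
  ys.foldl (fun tot y => if x > y + t then tot + 1 else tot) total

-- outer while loop: pop the head, scan the rest
def goCnt (t : Int) (total : Int) : List Int → Int
  | [] => total
  | x :: rest => goCnt t (innerCnt t x rest total) rest

def count_alt (arr : List Int) (t : Int) : Int := goCnt t 0 arr

-- ===== PRECONDITION & SPEC =====
def Spec_count (arr : List Int) (t : Int) (out : Int) : Prop := out = count_alt arr t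
instance (arr : List Int) (t : Int) (out : Int) : Decidable (Spec_count arr t out) := by unfold Spec_count; infer_instance

-- ===== CLAIM (what is proved, stated in full; the proofs are below) =====
def Claim_equal_count : Prop := ∀ (arr : List Int) (t : Int), Dom_count arr t → Spec_count arr t (count arr t)

-- ===== LEMMAS AND PROOFS =====

-- the segment arr[l..r] (inclusive) as a list
def seg (a : List Int) (l r : Nat) : List Int := (a.drop l).take (r + 1 - l)

-- write the elements of xs into temp starting at position k
def setAll (temp : List Int) (k : Nat) : List Int → List Int
  | [] => temp
  | x :: xs => setAll (temp.set k x) (k + 1) xs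

def ile : Int → Int → Bool := fun a b => decide (a ≤ b)

-- reference mergesort with A's split point and A's stable merge rule
def msort (xs : List Int) : List Int :=
  if h : xs.length ≤ 1 then xs
  else
    List.merge (msort (xs.take ((xs.length + 1) / 2))) (msort (xs.drop ((xs.length + 1) / 2))) ile
termination_by xs.length
decreasing_by
  · simp only [List.length_take]; omega
  · simp only [List.length_drop]; omega

-- number of y in ys with x > y + t
def hits (t x : Int) (ys : List Int) : Int := ((ys.filter fun y => decide (x > y + t)).length : Int)

-- number of x in xs with x > y + t
def lhits (t y : Int) (xs : List Int) : Int := ((xs.filter fun x => decide (x > y + t)).length : Int)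

-- number of cross pairs (x from X, y from Y) with x > y + t
def cross (t : Int) (X Y : List Int) : Int := (X.map fun x => hits t x Y).sum

-- positional pair count: pairs i < j with xs[i] > xs[j] + t
def pcount (t : Int) : List Int → Int
  | [] => 0
  | x :: xs => hits t x xs + pcount t xs

-- value of A's counting loop as a function of the two segments
def cnt2 (t : Int) : List Int → List Int → Int
  | _, [] => 0
  | [], _ :: _ => 0
  | x :: X, y :: Y =>
    if x > y + t then (((x :: X).length : Nat) : Int) + cnt2 t (x :: X) Y else cnt2 t X (y :: Y)
termination_by X Y => X.length + Y.length
decreasing_by all_goals (simp only [List.length_cons]; omega)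

-- the three merge loops composed, as mergeStep composes them
def loopsOut (a temp : List Int) (mid right i j k : Nat) : List Int :=
  let m := mergeLoop a temp mid right i j k
  let c1 := copyLoop a m.1 mid m.2.1 m.2.2.2
  (copyLoop a c1.1 right m.2.2.1 c1.2).1

theorem cnt2_nil_right (t : Int) (X : List Int) : cnt2 t X [] = 0 := by
  cases X <;> simp [cnt2]

theorem cnt2_nil_left (t : Int) (Y : List Int) : cnt2 t [] Y = 0 := by
  cases Y <;> simp [cnt2]

theorem drop_cons_getE (a : List Int) (i : Nat) (h : i < a.length) :
    a.drop i = getE a i :: a.drop (i + 1) := by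
  rw [List.drop_eq_getElem_cons h]
  congr 1
  unfold getE
  exact (List.getD_eq_getElem _ _ h).symm

theorem seg_nil (a : List Int) (i r : Nat) (h : r + 1 ≤ i) : seg a i r = [] := by
  simp [seg, Nat.sub_eq_zero_of_le h]

theorem seg_cons (a : List Int) (i r : Nat) (h1 : i ≤ r) (h2 : i < a.length) :
    seg a i r = getE a i :: seg a (i + 1) r := by
  unfold seg
  rw [drop_cons_getE a i h2, show r + 1 - i = (r - i) + 1 from by omega, List.take_succ_cons,
    show r + 1 - (i + 1) = r - i from by omega]

theorem seg_length (a : List Int) (i r : Nat) :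
    (seg a i r).length = min (r + 1 - i) (a.length - i) := by
  simp [seg, List.length_take, List.length_drop]

theorem take_succ_set (x : Int) : ∀ (l : List Int) (k : Nat), k < l.length →
    (l.set k x).take (k + 1) = l.take k ++ [x] := by
  intro l
  induction l with
  | nil => intro k h; simp at h
  | cons a l ih =>
    intro k h
    cases k with
    | zero => simp
    | succ k =>
      have h' : k < l.length := by simp at h; omega
      simp only [List.set_cons_succ, List.take_succ_cons, ih k h']
      simp

theorem drop_set_lt (x : Int) : ∀ (l : List Int) (k m : Nat), k < m →
    (l.set k x).drop m = l.drop m := by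
  intro l
  induction l with
  | nil => intro k m _; simp
  | cons a l ih =>
    intro k m h
    cases k with
    | zero =>
      cases m with
      | zero => omega
      | succ m => simp
    | succ k =>
      cases m with
      | zero => omega
      | succ m =>
        simp only [List.set_cons_succ, List.drop_succ_cons]
        exact ih k m (by omega)

theorem setAll_length (temp : List Int) (k : Nat) (xs : List Int) :
    (setAll temp k xs).length = temp.length := by
  induction xs generalizing temp k with
  | nil => rfl
  | cons x xs ih => simp [setAll, ih]

theorem setAll_eq (xs : List Int) : ∀ (temp : List Int) (k : Nat), k + xs.length ≤ temp.length →
    setAll temp k xs = temp.take k ++ xs ++ temp.drop (k + xs.length) := by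
  induction xs with
  | nil =>
    intro temp k _
    simp [setAll]
  | cons x xs ih =>
    intro temp k h
    simp only [List.length_cons] at h
    have hk : k < temp.length := by omega
    simp only [setAll]
    rw [ih (temp.set k x) (k + 1) (by simp [List.length_set]; omega)]
    rw [take_succ_set x temp k hk, drop_set_lt x temp k (k + 1 + xs.length) (by omega)]
    rw [show k + 1 + xs.length = k + (x :: xs).length from by simp only [List.length_cons]; omega]
    simp

theorem cntLoop_eq (a : List Int) (mid right : Nat) (t : Int)
    (hm : mid < a.length) (hr : right < a.length) :
    ∀ i j, cntLoop a mid right t i j = cnt2 t (seg a i mid) (seg a j right) := by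
  intro i j
  fun_induction cntLoop a mid right t i j with
  | case1 i j h hgt ih =>
    rw [ih]
    rw [seg_cons a j right h.2 (by omega), seg_cons a i mid h.1 (by omega)]
    simp only [cnt2]
    rw [if_pos hgt]
    have h1 : (seg a (i + 1) mid).length = mid - i := by rw [seg_length]; omega
    simp only [List.length_cons, h1]
    rw [show mid + 1 - i = mid - i + 1 from by omega]
  | case2 i j h hgt ih =>
    rw [ih]
    rw [seg_cons a i mid h.1 (by omega), seg_cons a j right h.2 (by omega)]
    simp only [cnt2]
    rw [if_neg hgt]
  | case3 i j h =>
    by_cases hi : i ≤ mid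
    · rw [seg_nil a j right (by omega), cnt2_nil_right]
    · rw [seg_nil a i mid (by omega), cnt2_nil_left]

theorem copyLoop_eq (a : List Int) (bound : Nat) (hb : bound < a.length) :
    ∀ i k temp, copyLoop a temp bound i k = (setAll temp k (seg a i bound), k + (bound + 1 - i)) := by
  intro i k temp
  fun_induction copyLoop a temp bound i k with
  | case1 temp i k h ih =>
    rw [ih]
    rw [seg_cons a i bound h (by omega)]
    simp only [setAll, Prod.mk.injEq]
    exact ⟨trivial, by omega⟩
  | case2 temp i k h =>
    rw [seg_nil a i bound (by omega)]
    simp only [setAll, Prod.mk.injEq]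
    exact ⟨trivial, by omega⟩

theorem loopsOut_eq (a : List Int) (mid right : Nat)
    (hm : mid < a.length) (hr : right < a.length) :
    ∀ i j k temp, loopsOut a temp mid right i j k
      = setAll temp k (List.merge (seg a i mid) (seg a j right) ile) := by
  intro i j k temp
  simp only [loopsOut]
  fun_induction mergeLoop a temp mid right i j k with
  | case1 temp i j k h hle ih =>
    rw [ih]
    rw [seg_cons a i mid h.1 (by omega), seg_cons a j right h.2 (by omega), List.cons_merge_cons]
    rw [if_pos (show ile (getE a i) (getE a j) = true from by simp [ile]; exact hle)]
    simp only [setAll]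
  | case2 temp i j k h hle ih =>
    rw [ih]
    rw [seg_cons a i mid h.1 (by omega), seg_cons a j right h.2 (by omega), List.cons_merge_cons]
    rw [if_neg (show ¬ ile (getE a i) (getE a j) = true from by simp [ile]; omega)]
    simp only [setAll]
  | case3 temp i j k h =>
    rw [copyLoop_eq a mid hm i k temp]
    simp only [copyLoop_eq a right hr]
    by_cases hi : i ≤ mid
    · rw [seg_nil a j right (by omega)]
      simp [setAll]
    · rw [seg_nil a i mid (by omega), show mid + 1 - i = 0 from by omega]
      simp [setAll, List.nil_merge]

theorem writeBack_eq (temp : List Int) (r : Nat) :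
    ∀ (i : Nat) (a : List Int), i ≤ r + 1 → r < a.length → r < temp.length →
    writeBack a temp i r = a.take i ++ seg temp i r ++ a.drop (r + 1) := by
  have main : ∀ (n i : Nat) (a : List Int), r + 1 - i ≤ n → i ≤ r + 1 → r < a.length →
      r < temp.length → writeBack a temp i r = a.take i ++ seg temp i r ++ a.drop (r + 1) := by
    intro n
    induction n with
    | zero =>
      intro i a hn hi ha ht
      have hi' : i = r + 1 := by omega
      subst hi'
      rw [writeBack, if_neg (by omega), seg_nil temp _ _ (by omega)]
      simp [List.take_append_drop]
    | succ n ih =>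
      intro i a hn hi ha ht
      by_cases hle : i ≤ r
      · rw [writeBack, if_pos hle]
        rw [ih (i + 1) (a.set i (getE temp i)) (by omega) (by omega) (by simp; omega) ht]
        rw [take_succ_set _ a i (by omega), drop_set_lt _ a i (r + 1) (by omega)]
        rw [seg_cons temp i r hle (by omega)]
        simp
      · have hi' : i = r + 1 := by omega
        subst hi'
        rw [writeBack, if_neg (by omega), seg_nil temp _ _ (by omega)]
        simp [List.take_append_drop]
  intro i a
  exact main (r + 1) i a (by omega)

theorem mergeStep_spec (a temp : List Int) (l mid r : Nat) (t : Int)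
    (h1 : l ≤ mid) (h2 : mid < r) (h3 : r < a.length) (h4 : temp.length = a.length) :
    mergeStep a temp l mid r t
      = (a.take l ++ List.merge (seg a l mid) (seg a (mid + 1) r) ile ++ a.drop (r + 1),
         setAll temp l (List.merge (seg a l mid) (seg a (mid + 1) r) ile),
         cnt2 t (seg a l mid) (seg a (mid + 1) r)) := by
  have hrfl : mergeStep a temp l mid r t
      = (writeBack a (loopsOut a temp mid r l (mid + 1) l) l r,
         loopsOut a temp mid r l (mid + 1) l,
         cntLoop a mid r t l (mid + 1)) := rfl
  rw [hrfl]
  rw [loopsOut_eq a mid r (by omega) h3 l (mid + 1) l temp]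
  rw [cntLoop_eq a mid r t (by omega) h3 l (mid + 1)]
  have hMlen : (List.merge (seg a l mid) (seg a (mid + 1) r) ile).length = r + 1 - l := by
    rw [List.length_merge, seg_length, seg_length]; omega
  have hsl : (setAll temp l (List.merge (seg a l mid) (seg a (mid + 1) r) ile)).length
      = temp.length := setAll_length temp l _
  rw [writeBack_eq (setAll temp l _) r l a (by omega) h3 (by rw [hsl, h4]; omega)]
  have hseg : seg (setAll temp l (List.merge (seg a l mid) (seg a (mid + 1) r) ile)) l r
      = List.merge (seg a l mid) (seg a (mid + 1) r) ile := by
    rw [setAll_eq _ temp l (by rw [hMlen]; omega)]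
    unfold seg
    rw [List.append_assoc, List.drop_left' (by rw [List.length_take]; omega)]
    exact List.take_left' hMlen
  rw [hseg]

theorem hits_nil (t x : Int) : hits t x [] = 0 := rfl

theorem hits_cons (t x y : Int) (ys : List Int) :
    hits t x (y :: ys) = (if x > y + t then 1 else 0) + hits t x ys := by
  by_cases h : x > y + t
  · simp [hits, List.filter_cons, h]
    ring
  · simp [hits, List.filter_cons, h]

theorem lhits_cons (t y x : Int) (xs : List Int) :
    lhits t y (x :: xs) = (if x > y + t then 1 else 0) + lhits t y xs := by
  by_cases h : x > y + t
  · simp [lhits, List.filter_cons, h]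
    ring
  · simp [lhits, List.filter_cons, h]

theorem hits_append (t x : Int) (u v : List Int) :
    hits t x (u ++ v) = hits t x u + hits t x v := by
  simp [hits, List.filter_append]

theorem cross_cons_left (t x : Int) (X Y : List Int) :
    cross t (x :: X) Y = hits t x Y + cross t X Y := by
  simp [cross]

theorem cross_nil_right (t : Int) (X : List Int) : cross t X [] = 0 := by
  induction X with
  | nil => simp [cross]
  | cons x X ih => rw [cross_cons_left, ih, hits_nil]; simp

theorem cross_cons_right (t y : Int) (X Y : List Int) :
    cross t X (y :: Y) = lhits t y X + cross t X Y := by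
  induction X with
  | nil => simp [cross, lhits]
  | cons x X ih =>
    rw [cross_cons_left, ih, cross_cons_left, hits_cons, lhits_cons]
    ring

theorem cnt2_cross (t : Int) (X Y : List Int)
    (hX : X.Pairwise (fun a b : Int => a ≤ b)) (hY : Y.Pairwise (fun a b : Int => a ≤ b)) :
    cnt2 t X Y = cross t X Y := by
  have main : ∀ (n : Nat) (X Y : List Int), X.length + Y.length ≤ n →
      X.Pairwise (fun a b : Int => a ≤ b) → Y.Pairwise (fun a b : Int => a ≤ b) →
      cnt2 t X Y = cross t X Y := by
    intro n
    induction n with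
    | zero =>
      intro X Y hn _ _
      cases X with
      | nil =>
        cases Y with
        | nil => rw [cnt2_nil_left]; simp [cross]
        | cons y Y => simp at hn
      | cons x X => simp at hn
    | succ n ih =>
      intro X Y hn hX hY
      cases Y with
      | nil => rw [cnt2_nil_right, cross_nil_right]
      | cons y Y' =>
        cases X with
        | nil => rw [cnt2_nil_left]; simp [cross]
        | cons x X' =>
          simp only [cnt2]
          by_cases hgt : x > y + t
          · rw [if_pos hgt]
            rw [ih (x :: X') Y' (by simp at hn ⊢; omega) hX (List.pairwise_cons.mp hY).2]
            rw [cross_cons_right t y (x :: X') Y']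
            have hall : lhits t y (x :: X') = (((x :: X').length : Nat) : Int) := by
              unfold lhits
              rw [List.filter_eq_self.mpr ?_]
              · intro b hb
                simp only [decide_eq_true_eq]
                rcases List.mem_cons.mp hb with h' | h'
                · omega
                · have hxb : x ≤ b := (List.pairwise_cons.mp hX).1 b h'
                  omega
            rw [hall]
          · rw [if_neg hgt]
            rw [ih X' (y :: Y') (by simp at hn ⊢; omega) (List.pairwise_cons.mp hX).2 hY]
            rw [cross_cons_left]
            have h0 : hits t x (y :: Y') = 0 := by
              unfold hits
              rw [List.filter_eq_nil_iff.mpr ?_]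
              · rfl
              · intro b hb
                simp only [decide_eq_true_eq]
                rcases List.mem_cons.mp hb with h' | h'
                · omega
                · have hyb : y ≤ b := (List.pairwise_cons.mp hY).1 b h'
                  omega
            rw [h0]
            ring
  exact main (X.length + Y.length) X Y (le_refl _) hX hY

theorem cross_perm_left (t : Int) {X X' : List Int} (h : X.Perm X') (Y : List Int) :
    cross t X Y = cross t X' Y := by
  unfold cross
  exact (h.map _).sum_eq

theorem cross_perm_right (t : Int) (X : List Int) {Y Y' : List Int} (h : Y.Perm Y') :
    cross t X Y = cross t X Y' := by
  unfold cross
  congr 1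
  apply List.map_congr_left
  intro x _
  unfold hits
  rw [(h.filter _).length_eq]

theorem pcount_append (t : Int) (u v : List Int) :
    pcount t (u ++ v) = pcount t u + pcount t v + cross t u v := by
  induction u with
  | nil => simp [pcount, cross]
  | cons x u ih =>
    simp only [List.cons_append, pcount]
    rw [hits_append, ih, cross_cons_left]
    ring

theorem msort_perm (xs : List Int) : (msort xs).Perm xs := by
  fun_induction msort xs with
  | case1 xs h => exact List.Perm.refl _
  | case2 xs h ih1 ih2 =>
    exact (List.merge_perm_append ile).trans
      ((ih1.append ih2).trans (List.Perm.of_eq (List.take_append_drop _ _)))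

theorem msort_length (xs : List Int) : (msort xs).length = xs.length :=
  (msort_perm xs).length_eq

theorem msort_pairwise (xs : List Int) : (msort xs).Pairwise (fun a b : Int => a ≤ b) := by
  fun_induction msort xs with
  | case1 xs h =>
    rcases xs with _ | ⟨x, _ | ⟨y, l⟩⟩
    · exact List.Pairwise.nil
    · simp
    · simp at h
  | case2 xs h ih1 ih2 =>
    have conv : ∀ (l : List Int), l.Pairwise (fun a b => ile a b = true)
        ↔ l.Pairwise (fun a b : Int => a ≤ b) := by
      intro l; simp [ile]
    rw [← conv]
    exact List.pairwise_merge (by intro a b c hab hbc; simp [ile] at *; omega)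
      (by intro a b; simp [ile]; omega) _ _ ((conv _).mpr ih1) ((conv _).mpr ih2)

theorem msort_step (xs : List Int) (h : 2 ≤ xs.length) :
    msort xs = List.merge (msort (xs.take ((xs.length + 1) / 2)))
      (msort (xs.drop ((xs.length + 1) / 2))) ile := by
  rw [msort, dif_neg (by omega)]

theorem mergeAndCount_step (a temp : List Int) (l r : Nat) (t : Int) (h : l < r) :
    mergeAndCount a temp l r t =
      ((mergeStep (mergeAndCount (mergeAndCount a temp l ((l + r) / 2) t).1
              (mergeAndCount a temp l ((l + r) / 2) t).2.1 ((l + r) / 2 + 1) r t).1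
            (mergeAndCount (mergeAndCount a temp l ((l + r) / 2) t).1
              (mergeAndCount a temp l ((l + r) / 2) t).2.1 ((l + r) / 2 + 1) r t).2.1
            l ((l + r) / 2) r t).1,
        (mergeStep (mergeAndCount (mergeAndCount a temp l ((l + r) / 2) t).1
              (mergeAndCount a temp l ((l + r) / 2) t).2.1 ((l + r) / 2 + 1) r t).1
            (mergeAndCount (mergeAndCount a temp l ((l + r) / 2) t).1
              (mergeAndCount a temp l ((l + r) / 2) t).2.1 ((l + r) / 2 + 1) r t).2.1
            l ((l + r) / 2) r t).2.1,
        (mergeAndCount a temp l ((l + r) / 2) t).2.2 +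
          (mergeAndCount (mergeAndCount a temp l ((l + r) / 2) t).1
              (mergeAndCount a temp l ((l + r) / 2) t).2.1 ((l + r) / 2 + 1) r t).2.2 +
          (mergeStep (mergeAndCount (mergeAndCount a temp l ((l + r) / 2) t).1
              (mergeAndCount a temp l ((l + r) / 2) t).2.1 ((l + r) / 2 + 1) r t).1
            (mergeAndCount (mergeAndCount a temp l ((l + r) / 2) t).1
              (mergeAndCount a temp l ((l + r) / 2) t).2.1 ((l + r) / 2 + 1) r t).2.1
            l ((l + r) / 2) r t).2.2) := by
  rw [mergeAndCount, dif_pos h]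

theorem mergeAndCount_spec (t : Int) : ∀ (n l r : Nat), n = r - l →
    ∀ (a temp : List Int), l ≤ r → r < a.length → temp.length = a.length →
    (mergeAndCount a temp l r t).1 = a.take l ++ msort (seg a l r) ++ a.drop (r + 1)
    ∧ (mergeAndCount a temp l r t).2.1.length = a.length
    ∧ (mergeAndCount a temp l r t).2.2 = pcount t (seg a l r) := by
  intro n
  induction n using Nat.strong_induction_on with
  | _ n ih =>
    intro l r hn a temp hlr hr hlen
    by_cases hlt : l < r
    · set mid := (l + r) / 2 with hmid
      have hmid1 : l ≤ mid := by omega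
      have hmid2 : mid < r := by omega
      have hstep := mergeAndCount_step a temp l r t hlt
      rw [← hmid] at hstep
      obtain ⟨ih1a, ih1len, ih1c⟩ := ih (mid - l) (by omega) l mid rfl a temp hmid1 (by omega) hlen
      have hA : (a.take l).length = l := by rw [List.length_take]; omega
      have hLlen : (seg a l mid).length = mid + 1 - l := by rw [seg_length]; omega
      have hRlen : (seg a (mid + 1) r).length = r - mid := by rw [seg_length]; omega
      have hmsL : (msort (seg a l mid)).length = mid + 1 - l := by rw [msort_length, hLlen]
      have hmsR : (msort (seg a (mid + 1) r)).length = r - mid := by rw [msort_length, hRlen]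
      have h1len' : (mergeAndCount a temp l mid t).1.length = a.length := by
        rw [ih1a]
        simp only [List.length_append, List.length_take, List.length_drop, hmsL]
        omega
      obtain ⟨ih2a, ih2len, ih2c⟩ := ih (r - (mid + 1)) (by omega) (mid + 1) r rfl
        (mergeAndCount a temp l mid t).1 (mergeAndCount a temp l mid t).2.1
        (by omega) (by rw [h1len']; exact hr) (by rw [ih1len, h1len'])
      have hd1 : (mergeAndCount a temp l mid t).1.drop (mid + 1) = a.drop (mid + 1) := by
        rw [ih1a]
        exact List.drop_left' (by simp only [List.length_append, hA, hmsL]; omega)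
      have ht1 : (mergeAndCount a temp l mid t).1.take (mid + 1)
          = a.take l ++ msort (seg a l mid) := by
        rw [ih1a]
        exact List.take_left' (by simp only [List.length_append, hA, hmsL]; omega)
      have hseg2 : seg (mergeAndCount a temp l mid t).1 (mid + 1) r = seg a (mid + 1) r := by
        unfold seg
        rw [hd1]
      have hd2 : (mergeAndCount a temp l mid t).1.drop (r + 1) = a.drop (r + 1) := by
        rw [show r + 1 = (mid + 1) + (r - mid) from by omega,
          ← List.drop_drop (i := r - mid) (j := mid + 1), hd1, List.drop_drop]
      rw [hseg2] at ih2a ih2c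
      rw [ht1, hd2] at ih2a
      have hS2len : (mergeAndCount (mergeAndCount a temp l mid t).1
          (mergeAndCount a temp l mid t).2.1 (mid + 1) r t).1.length = a.length := by
        rw [ih2a]
        simp only [List.length_append, hA, hmsL, hmsR, List.length_drop]
        omega
      have hsegL : seg (mergeAndCount (mergeAndCount a temp l mid t).1
          (mergeAndCount a temp l mid t).2.1 (mid + 1) r t).1 l mid = msort (seg a l mid) := by
        unfold seg
        rw [ih2a, List.append_assoc, List.append_assoc, List.drop_left' hA]
        exact List.take_left' (by rw [hmsL])
      have hsegR : seg (mergeAndCount (mergeAndCount a temp l mid t).1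
          (mergeAndCount a temp l mid t).2.1 (mid + 1) r t).1 (mid + 1) r
          = msort (seg a (mid + 1) r) := by
        conv_lhs => rw [seg]
        rw [ih2a, List.append_assoc, List.drop_left' (by simp only [List.length_append, hA, hmsL]; omega)]
        rw [show r + 1 - (mid + 1) = r - mid from by omega]
        exact List.take_left' hmsR
      have hS2take : (mergeAndCount (mergeAndCount a temp l mid t).1
          (mergeAndCount a temp l mid t).2.1 (mid + 1) r t).1.take l = a.take l := by
        rw [ih2a, List.append_assoc, List.append_assoc]
        exact List.take_left' hA
      have hS2drop : (mergeAndCount (mergeAndCount a temp l mid t).1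
          (mergeAndCount a temp l mid t).2.1 (mid + 1) r t).1.drop (r + 1) = a.drop (r + 1) := by
        rw [ih2a]
        exact List.drop_left' (by simp only [List.length_append, hA, hmsL, hmsR]; omega)
      have hms := mergeStep_spec (mergeAndCount (mergeAndCount a temp l mid t).1
          (mergeAndCount a temp l mid t).2.1 (mid + 1) r t).1
        (mergeAndCount (mergeAndCount a temp l mid t).1
          (mergeAndCount a temp l mid t).2.1 (mid + 1) r t).2.1 l mid r t
        hmid1 hmid2 (by rw [hS2len]; exact hr) (by rw [ih2len, h1len', hS2len])
      rw [hsegL, hsegR] at hms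
      have hs : ((seg a l r).length + 1) / 2 = mid + 1 - l := by rw [seg_length]; omega
      have e1 : (seg a l r).take (((seg a l r).length + 1) / 2) = seg a l mid := by
        rw [hs]
        unfold seg
        rw [List.take_take]
        congr 1
        omega
      have e2 : (seg a l r).drop (((seg a l r).length + 1) / 2) = seg a (mid + 1) r := by
        rw [hs]
        unfold seg
        rw [List.drop_take, List.drop_drop]
        rw [show l + (mid + 1 - l) = mid + 1 from by omega,
          show r + 1 - l - (mid + 1 - l) = r + 1 - (mid + 1) from by omega]
      have hmerge : List.merge (msort (seg a l mid)) (msort (seg a (mid + 1) r)) ile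
          = msort (seg a l r) := by
        rw [msort_step (seg a l r) (by rw [seg_length]; omega), e1, e2]
      have hsplit : seg a l mid ++ seg a (mid + 1) r = seg a l r := by
        rw [← e1, ← e2, List.take_append_drop]
      refine ⟨?_, ?_, ?_⟩
      · rw [hstep, hms, hS2take, hS2drop, hmerge]
      · rw [hstep, hms]
        show (setAll (mergeAndCount (mergeAndCount a temp l mid t).1
            (mergeAndCount a temp l mid t).2.1 (mid + 1) r t).2.1 l
            (List.merge (msort (seg a l mid)) (msort (seg a (mid + 1) r)) ile)).length
          = a.length
        rw [setAll_length, ih2len, h1len']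
      · rw [hstep, hms]
        show (mergeAndCount a temp l mid t).2.2
            + (mergeAndCount (mergeAndCount a temp l mid t).1
                (mergeAndCount a temp l mid t).2.1 (mid + 1) r t).2.2
            + cnt2 t (msort (seg a l mid)) (msort (seg a (mid + 1) r))
          = pcount t (seg a l r)
        rw [ih1c, ih2c]
        rw [cnt2_cross t _ _ (msort_pairwise _) (msort_pairwise _)]
        rw [cross_perm_left t (msort_perm _) _, cross_perm_right t _ (msort_perm _)]
        rw [← hsplit, pcount_append]
    · have hlr' : l = r := by omega
      subst hlr'
      rw [mergeAndCount, dif_neg (by omega)]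
      have hseg1 : seg a l l = [getE a l] := by
        rw [seg_cons a l l (Nat.le_refl l) (by omega), seg_nil a (l + 1) l (by omega)]
      have hm1 : msort (seg a l l) = [getE a l] := by
        rw [hseg1, msort]
        simp
      refine ⟨?_, ?_, ?_⟩
      · show a = a.take l ++ msort (seg a l l) ++ a.drop (l + 1)
        rw [hm1]
        conv_lhs => rw [← List.take_append_drop l a]
        rw [drop_cons_getE a l (by omega)]
        simp
      · show temp.length = a.length
        exact hlen
      · show (0 : Int) = pcount t (seg a l l)
        rw [hseg1]
        simp [pcount, hits]

theorem innerCnt_eq (t x : Int) (ys : List Int) : ∀ (total : Int),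
    innerCnt t x ys total = total + hits t x ys := by
  induction ys with
  | nil => intro total; simp [innerCnt, hits]
  | cons y ys ih =>
    intro total
    simp only [innerCnt, List.foldl_cons] at ih ⊢
    rw [hits_cons]
    by_cases h : x > y + t
    · simp only [if_pos h]
      rw [ih]
      omega
    · simp only [if_neg h]
      rw [ih]
      omega

theorem goCnt_eq (t : Int) : ∀ (xs : List Int) (total : Int),
    goCnt t total xs = total + pcount t xs := by
  intro xs
  induction xs with
  | nil => intro total; simp [goCnt, pcount]
  | cons x rest ih =>
    intro total
    simp only [goCnt]
    rw [ih, innerCnt_eq]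
    simp only [pcount]
    ring

-- ===== VERDICT (by name: the statement is the Claim_ definition above) =====
theorem count_spec : Claim_equal_count := by
  intro arr t _
  show count arr t = count_alt arr t
  unfold count count_alt
  rcases arr with _ | ⟨x, rest⟩
  · simp [mergeAndCount, goCnt]
  · obtain ⟨h1, h2, h3⟩ := mergeAndCount_spec t ((x :: rest).length - 1) 0 ((x :: rest).length - 1)
      (by omega) (x :: rest) (List.replicate (x :: rest).length 0)
      (by omega) (by simp) (by simp)
    rw [h3, goCnt_eq]
    have hseg : seg (x :: rest) 0 ((x :: rest).length - 1) = x :: rest := by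
      unfold seg
      rw [List.drop_zero, show (x :: rest).length - 1 + 1 - 0 = (x :: rest).length from by simp,
        List.take_length]
    rw [hseg]
    ring
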